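-- pv_equiv track=rewrite | github.com/hnc01/online-judge | Programming Challenges (Skiena & Revilla)/Chapter 3/accepted/crypt-kicker-ii.py | is_seed
-- ===== SOURCE A (Python) =====
-- seed = "the quick brown fox jumps over the lazy dog"
--
-- def is_seed(line):
--     if len(line) == len(seed):
--         # they have the same number of character so they could be a match
--         seed_list = seed.split(" ")
--         line_list = line.split(" ")
--
--         if len(seed_list) == len(line_list):
--             # they have the same number of words
--             for index in range(0, len(seed_list)):
--                 if len(seed_list[index]) != len(line_list[index]):
--                     return False
--
--             return True
--         else:
--             return False
--     else:
--         return False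
-- ===== SOURCE B (Python) =====
-- seed = "the quick brown fox jumps over the lazy dog"
--
-- def is_seed(line):
--     if len(line) != len(seed):
--         return False
--     for sc, lc in zip(seed, line):
--         if (sc == ' ') != (lc == ' '):
--             return False
--     return True
-- ===== Notes on version B (the rewrite author's own statement) =====
-- stated objective: simpler
-- what changed: Instead of splitting both strings into word lists and comparing word counts and per-index word lengths, B does one positional scan over zip(seed, line) checking that spaces occur at exactly the same positions (after the same length guard), which is equivalent for equal-length strings.
import Mathlib
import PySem

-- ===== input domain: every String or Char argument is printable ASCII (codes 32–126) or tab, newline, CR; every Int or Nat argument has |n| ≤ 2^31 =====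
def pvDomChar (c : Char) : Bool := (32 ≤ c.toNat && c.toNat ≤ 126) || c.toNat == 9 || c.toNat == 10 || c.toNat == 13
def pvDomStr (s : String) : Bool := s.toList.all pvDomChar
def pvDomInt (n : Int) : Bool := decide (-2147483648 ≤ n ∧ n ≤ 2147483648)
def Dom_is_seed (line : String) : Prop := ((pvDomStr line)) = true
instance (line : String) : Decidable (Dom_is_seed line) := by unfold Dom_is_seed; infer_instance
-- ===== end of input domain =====

-- B replaces A's split-into-words + word-length comparison by a single positional scan
-- checking that spaces sit at identical positions (objective: simpler).

-- module-level constant shared by both sources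
def pvSeed : String := "the quick brown fox jumps over the lazy dog"

-- ===== PORT A =====
-- the 'for index in range(0, len(seed_list))' loop with its early 'return False';
-- indices produced by range(len(seed_list)) are always in range, so the `.getD ""`
-- default of the in-range pyGet? is never used.
def pvLenLoop (sl ll : List String) : List Int → Bool
  | [] => true
  | i :: rest =>
      if PySem.Str.len ((PySem.List.pyGet? sl i).getD "") ≠ PySem.Str.len ((PySem.List.pyGet? ll i).getD "") then
        false
      else pvLenLoop sl ll rest

def is_seed (line : String) : Bool :=
  if PySem.Str.len line = PySem.Str.len pvSeed then
    -- split(" "): the separator " " is nonempty, so split? is always `some`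
    let seed_list := (PySem.Str.split? pvSeed " ").getD []
    let line_list := (PySem.Str.split? line " ").getD []
    if seed_list.length = line_list.length then
      pvLenLoop seed_list line_list (PySem.List.pyRange 0 (seed_list.length : Int) 1)
    else false
  else false

-- ===== PORT B =====
-- the 'for sc, lc in zip(seed, line)' loop with its early 'return False'
def pvZipLoop : List (Char × Char) → Bool
  | [] => true
  | (sc, lc) :: rest => if ((sc == ' ') != (lc == ' ')) then false else pvZipLoop rest

def is_seed_alt (line : String) : Bool :=
  if PySem.Str.len line ≠ PySem.Str.len pvSeed then false
  else pvZipLoop (pvSeed.toList.zip line.toList)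

-- ===== PRECONDITION & SPEC =====
def Spec_is_seed (line : String) (out : Bool) : Prop := out = is_seed_alt line
instance (line : String) (out : Bool) : Decidable (Spec_is_seed line out) := by unfold Spec_is_seed; infer_instance

-- ===== CLAIM (what is proved, stated in full; the proofs are below) =====
def Claim_equal_is_seed : Prop := ∀ (line : String), Dom_is_seed line → Spec_is_seed line (is_seed line)

-- ===== LEMMAS AND PROOFS =====

-- space mask of a string
def pvMask (cs : List Char) : List Bool := cs.map (· == ' ')

-- simple (unfueled) split on ' ' carrying the current word
def pvSp (cur : List Char) : List Char → List (List Char)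
  | [] => [cur]
  | c :: rest => if c == ' ' then cur :: pvSp [] rest else pvSp (cur ++ [c]) rest

-- word lengths computed from the space mask, current word length n
def pvG (n : Nat) : List Bool → List Nat
  | [] => [n]
  | true :: r => n :: pvG 0 r
  | false :: r => pvG (n + 1) r

theorem pvSp_go (fuel : Nat) : ∀ (l cur : List Char) (acc : List (List Char)),
    l.length ≤ fuel →
    PySem.Chars.splitOn.go [' '] fuel l cur acc = acc.reverse ++ pvSp cur.reverse l := by
  induction fuel with
  | zero =>
    intro l cur acc h
    have hl : l = [] := List.length_eq_zero_iff.mp (Nat.le_zero.mp h)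
    subst hl
    simp [PySem.Chars.splitOn.go, pvSp]
  | succ n ih =>
    intro l cur acc h
    match l with
    | [] => simp [PySem.Chars.splitOn.go, pvSp]
    | c :: rest =>
      by_cases hc : c = ' '
      · subst hc
        rw [show PySem.Chars.splitOn.go [' '] (n+1) (' ' :: rest) cur acc
              = PySem.Chars.splitOn.go [' '] n rest [] (cur.reverse :: acc) by
            simp [PySem.Chars.splitOn.go, List.isPrefixOf]]
        rw [ih rest [] (cur.reverse :: acc) (by simp at h; omega)]
        simp [pvSp]
      · rw [show PySem.Chars.splitOn.go [' '] (n+1) (c :: rest) cur acc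
              = PySem.Chars.splitOn.go [' '] n rest (c :: cur) acc by
            simp [PySem.Chars.splitOn.go, List.isPrefixOf, Ne.symm hc]]
        rw [ih rest (c :: cur) acc (by simp at h; omega)]
        simp [pvSp, hc]

theorem pvSplitOn_eq (s : List Char) : PySem.Chars.splitOn s [' '] = pvSp [] s := by
  unfold PySem.Chars.splitOn
  rw [pvSp_go (s.length + 1) s [] [] (by omega)]
  simp

theorem pvSp_len (l : List Char) : ∀ cur, (pvSp cur l).map List.length = pvG cur.length (pvMask l) := by
  induction l with
  | nil => intro cur; simp [pvSp, pvG, pvMask]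
  | cons c rest ih =>
    intro cur
    by_cases hc : c = ' '
    · subst hc; simp [pvSp, pvMask, pvG] at ih ⊢; simpa using ih []
    · have hb : (c == ' ') = false := by simp [hc]
      simp only [pvSp, pvMask, hb, Bool.false_eq_true, if_false, List.map_cons, pvG] at ih ⊢
      simpa using ih (cur ++ [c])

theorem pvG_head (x : List Bool) : ∀ n, ∃ h t, pvG n x = h :: t ∧ n ≤ h := by
  induction x with
  | nil => intro n; exact ⟨n, [], rfl, le_refl n⟩
  | cons b r ih =>
    intro n
    cases b with
    | true => exact ⟨n, pvG 0 r, rfl, le_refl n⟩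
    | false =>
      obtain ⟨h, t, he, hle⟩ := ih (n + 1)
      exact ⟨h, t, by simpa [pvG] using he, by omega⟩

theorem pvG_inj (a : List Bool) : ∀ b n, pvG n a = pvG n b → a = b := by
  induction a with
  | nil =>
    intro b n h
    cases b with
    | nil => rfl
    | cons x r =>
      cases x with
      | true =>
        obtain ⟨h0, t0, he, _⟩ := pvG_head r 0
        simp [pvG, he] at h
      | false =>
        obtain ⟨h0, t0, he, hge⟩ := pvG_head r (n + 1)
        simp [pvG, he] at h
        omega
  | cons x r ih =>
    intro b n h
    cases b with
    | nil =>
      cases x with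
      | true =>
        obtain ⟨h0, t0, he, _⟩ := pvG_head r 0
        simp [pvG, he] at h
      | false =>
        obtain ⟨h0, t0, he, hge⟩ := pvG_head r (n + 1)
        simp [pvG, he] at h
        omega
    | cons y s =>
      cases x with
      | true =>
        cases y with
        | true =>
          simp [pvG] at h
          simp [ih s 0 h]
        | false =>
          obtain ⟨h0, t0, he, hge⟩ := pvG_head s (n + 1)
          simp [pvG, he] at h
          omega
      | false =>
        cases y with
        | true =>
          obtain ⟨h0, t0, he, hge⟩ := pvG_head r (n + 1)
          simp [pvG, he] at h
          omega
        | false =>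
          simp [pvG] at h ⊢
          exact ih s (n + 1) h

-- helper facts about split(" ") at the String level
theorem pvSplit_words (s : String) :
    (PySem.Str.split? s " ").getD [] = (PySem.Chars.splitOn s.toList [' ']).map String.ofList := by
  simp [PySem.Str.split?, PySem.Chars.split?]

theorem pvWordLens (s : String) :
    ((PySem.Str.split? s " ").getD []).map PySem.Str.len
      = (pvG 0 (pvMask s.toList)).map (fun n : Nat => (n : Int)) := by
  rw [pvSplit_words, pvSplitOn_eq]
  have h1 := pvSp_len s.toList []
  simp only [List.length_nil] at h1
  rw [← h1, List.map_map, List.map_map]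
  simp only [Function.comp_def, PySem.Str.len_eq]
  simp

theorem pvWordCount (s : String) :
    ((PySem.Str.split? s " ").getD []).length = (pvG 0 (pvMask s.toList)).length := by
  have := congrArg List.length (pvWordLens s)
  simpa using this

theorem pvWordLens_iff (a b : String) :
    (((PySem.Str.split? a " ").getD []).map PySem.Str.len
       = ((PySem.Str.split? b " ").getD []).map PySem.Str.len)
      ↔ pvMask a.toList = pvMask b.toList := by
  rw [pvWordLens, pvWordLens]
  constructor
  · intro h
    exact pvG_inj _ _ _ (List.map_injective_iff.mpr (fun x y hxy => by exact_mod_cast hxy) h)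
  · intro h; rw [h]

theorem pvMask_length (a : List Char) : (pvMask a).length = a.length := by
  simp [pvMask]

-- A's range loop is the pointwise comparison of the word-length lists
theorem pvLenLoop_eq (sl ll : List String) (h : sl.length = ll.length) :
    ∀ m k, k + m = sl.length →
    pvLenLoop sl ll (PySem.List.pyRange (k : Int) (sl.length : Int) 1) =
      decide ((sl.drop k).map PySem.Str.len = (ll.drop k).map PySem.Str.len) := by
  intro m
  induction m with
  | zero =>
    intro k hk
    rw [PySem.List.pyRange_one_eq_nil (by exact_mod_cast (by omega : sl.length ≤ k))]
    have hk' : k = sl.length := by omega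
    rw [hk']
    simp [pvLenLoop, List.drop_length, List.drop_eq_nil_of_le (le_of_eq h.symm)]
  | succ p ihm =>
    intro k hk
    have hk1 : k < sl.length := by omega
    have hk2 : k < ll.length := by omega
    rw [PySem.List.pyRange_one_cons (by exact_mod_cast hk1),
        show (k : Int) + 1 = ((k + 1 : Nat) : Int) by push_cast; ring]
    have e1 : (PySem.List.pyGet? sl (k : Int)).getD "" = sl[k] := by
      simp [List.getElem?_eq_getElem hk1]
    have e2 : (PySem.List.pyGet? ll (k : Int)).getD "" = ll[k] := by
      simp [List.getElem?_eq_getElem hk2]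
    rw [List.drop_eq_getElem_cons hk1, List.drop_eq_getElem_cons hk2]
    by_cases hw : PySem.Str.len sl[k] = PySem.Str.len ll[k]
    · rw [show pvLenLoop sl ll ((k : Int) :: PySem.List.pyRange ((k + 1 : Nat) : Int) (sl.length : Int) 1)
            = pvLenLoop sl ll (PySem.List.pyRange ((k + 1 : Nat) : Int) (sl.length : Int) 1) by
          simp only [pvLenLoop, e1, e2]
          rw [if_neg (not_not_intro hw)]]
      rw [ihm (k + 1) (by omega)]
      apply decide_eq_decide.mpr
      rw [List.map_cons, List.map_cons, hw]
      simp
    · rw [show pvLenLoop sl ll ((k : Int) :: PySem.List.pyRange ((k + 1 : Nat) : Int) (sl.length : Int) 1)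
            = false by
          simp only [pvLenLoop, e1, e2]
          rw [if_pos hw]]
      rw [eq_comm, decide_eq_false_iff_not, List.map_cons, List.map_cons]
      intro hcons
      injection hcons with h1 _
      exact hw h1

theorem pvZipLoop_eq (a : List Char) : ∀ b : List Char, a.length = b.length →
    pvZipLoop (a.zip b) = decide (pvMask a = pvMask b) := by
  induction a with
  | nil =>
    intro b hb
    have : b = [] := by simpa using (List.length_eq_zero_iff.mp hb.symm)
    subst this
    simp [pvZipLoop, pvMask]
  | cons c r ih =>
    intro b hb
    match b with
    | [] => simp at hb
    | d :: s =>
      simp only [List.zip_cons_cons, pvZipLoop, pvMask, List.map_cons]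
      by_cases hc : (c == ' ') = (d == ' ')
      · rw [if_neg (by simp [hc])]
        have := ih s (by simpa using hb)
        simp only [pvMask] at this
        rw [this]
        simp [hc]
      · rw [if_pos (by simpa [bne_iff_ne] using hc)]
        simp [hc]

theorem pvA_eq (line : String) :
    is_seed line = decide (pvMask line.toList = pvMask pvSeed.toList) := by
  unfold is_seed
  by_cases hlen : PySem.Str.len line = PySem.Str.len pvSeed
  · rw [if_pos hlen]
    show (if ((PySem.Str.split? pvSeed " ").getD []).length = ((PySem.Str.split? line " ").getD []).length then
            pvLenLoop ((PySem.Str.split? pvSeed " ").getD []) ((PySem.Str.split? line " ").getD [])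
              (PySem.List.pyRange 0 (((PySem.Str.split? pvSeed " ").getD []).length : Int) 1)
          else false) = _
    by_cases hm : pvMask line.toList = pvMask pvSeed.toList
    · have hcount : ((PySem.Str.split? pvSeed " ").getD []).length
          = ((PySem.Str.split? line " ").getD []).length := by
        rw [pvWordCount, pvWordCount, hm]
      rw [if_pos hcount]
      have hloop := pvLenLoop_eq ((PySem.Str.split? pvSeed " ").getD [])
        ((PySem.Str.split? line " ").getD []) hcount
        ((PySem.Str.split? pvSeed " ").getD []).length 0 (by omega)
      simp only [Nat.cast_zero, List.drop_zero] at hloop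
      rw [hloop]
      simp [(pvWordLens_iff pvSeed line).mpr hm.symm, hm]
    · have hne := fun hE => hm ((pvWordLens_iff line pvSeed).mp hE)
      by_cases hcount : ((PySem.Str.split? pvSeed " ").getD []).length
          = ((PySem.Str.split? line " ").getD []).length
      · rw [if_pos hcount]
        have hloop := pvLenLoop_eq ((PySem.Str.split? pvSeed " ").getD [])
          ((PySem.Str.split? line " ").getD []) hcount
          ((PySem.Str.split? pvSeed " ").getD []).length 0 (by omega)
        simp only [Nat.cast_zero, List.drop_zero] at hloop
        rw [hloop]
        simp [hm]
        intro hE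
        exact hne hE.symm
      · rw [if_neg hcount]
        simp [hm]
  · rw [if_neg hlen]
    have : pvMask line.toList ≠ pvMask pvSeed.toList := by
      intro hm
      apply hlen
      have := congrArg List.length hm
      rw [pvMask_length, pvMask_length] at this
      rw [PySem.Str.len_eq, PySem.Str.len_eq, this]
    simp [this]

theorem pvB_eq (line : String) :
    is_seed_alt line = decide (pvMask line.toList = pvMask pvSeed.toList) := by
  unfold is_seed_alt
  by_cases hlen : PySem.Str.len line = PySem.Str.len pvSeed
  · rw [if_neg (not_not_intro hlen)]
    have hl : pvSeed.toList.length = line.toList.length := by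
      rw [PySem.Str.len_eq, PySem.Str.len_eq] at hlen
      omega
    rw [pvZipLoop_eq _ _ hl]
    simp [eq_comm]
  · rw [if_pos hlen]
    have : pvMask line.toList ≠ pvMask pvSeed.toList := by
      intro hm
      apply hlen
      have := congrArg List.length hm
      rw [pvMask_length, pvMask_length] at this
      rw [PySem.Str.len_eq, PySem.Str.len_eq, this]
    simp [this]

-- ===== VERDICT (by name: the statement is the Claim_ definition above) =====
theorem is_seed_spec : Claim_equal_is_seed := by
  intro line _
  unfold Spec_is_seed
  rw [pvA_eq, pvB_eq]
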